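-- pv_equiv track=rewrite | github.com/KingSK1998/Python-Programs | StringPair.py | MrString
-- ===== SOURCE A (Python) =====
-- def num2words(num):
--     ones = ['one', 'two', 'three', 'four', 'five', 'six', 'seven', 'eight', 'nine']
--     teens = ['eleven', 'twelve', 'thirteen', 'fourteen', 'fifteen', 'sixteen', 'seventeen', 'eighteen', 'nineteen']
--     tens = ['ten', 'twenty', 'thirty', 'fourty', 'fifty', 'sixty', 'seventy', 'eighty', 'ninety']
--     numString = ""
--     if num == 0: numString = "zero"
--     elif num == 100: numString = "hundred"
--     else:
--         if num <= 9:
--             numString = ones[num-1]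
--         elif num >= 11 and num <=19:
--             numString = teens[num%10 - 1]
--         elif num%10 == 0:
--             numString = tens[int(num/10)-1]
--         else:
--             numString = tens[int(num/10) - 1] + " " + ones[num%10 - 1]
--     return numString
--
-- def MrString(num):
--     sum = 0
--     for n in num:
--         count = 0
--         string = num2words(n)
--         for i in string:
--             if i in 'aeiou':
--                 count += 1
--         sum += count
--     return sum
-- ===== SOURCE B (Python) =====
-- # Vowel-count tables for the word building blocks; dispatch adds counts arithmetically
-- # instead of building the spelling string and scanning its characters.
-- _ONES_V = [2, 1, 2, 2, 2, 1, 2, 2, 2]   # one..nine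
-- _TEENS_V = [3, 2, 3, 4, 3, 3, 4, 4, 4]  # eleven..nineteen
-- _TENS_V = [1, 1, 1, 2, 1, 1, 2, 2, 2]   # ten..ninety
--
-- def _vowels(n):
--     if n == 0 or n == 100:
--         return 2  # "zero" / "hundred"
--     if n <= 9:
--         return _ONES_V[n - 1]
--     if 11 <= n <= 19:
--         return _TEENS_V[n % 10 - 1]
--     if n % 10 == 0:
--         return _TENS_V[n // 10 - 1]
--     return _TENS_V[n // 10 - 1] + _ONES_V[n % 10 - 1]
--
-- def MrString(num):
--     return sum(_vowels(n) for n in num)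
-- ===== Notes on version B (the rewrite author's own statement) =====
-- stated objective: alternative
-- what changed: B replaces num2words' string construction and per-character vowel scan with precomputed vowel-count tables for the word building blocks, dispatching on the same branches but adding counts arithmetically; MrString becomes a one-line sum.
import Mathlib
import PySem

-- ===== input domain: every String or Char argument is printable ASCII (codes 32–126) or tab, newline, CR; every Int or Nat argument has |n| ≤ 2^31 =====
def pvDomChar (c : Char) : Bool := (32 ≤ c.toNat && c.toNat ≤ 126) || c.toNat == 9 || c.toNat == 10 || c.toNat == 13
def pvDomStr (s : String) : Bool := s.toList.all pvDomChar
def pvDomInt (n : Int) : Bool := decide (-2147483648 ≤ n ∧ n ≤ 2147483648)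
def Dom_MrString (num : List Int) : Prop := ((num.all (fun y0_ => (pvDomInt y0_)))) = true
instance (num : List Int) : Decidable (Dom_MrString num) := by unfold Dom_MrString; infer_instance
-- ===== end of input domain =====

set_option maxRecDepth 4000

-- B replaces num2words' string construction + character scan with precomputed
-- vowel-count tables added arithmetically (objective: simpler/alternative decomposition).


-- ===== PORT A =====
def pyOnes : List String := ["one","two","three","four","five","six","seven","eight","nine"]
def pyTeens : List String := ["eleven","twelve","thirteen","fourteen","fifteen","sixteen","seventeen","eighteen","nineteen"]
def pyTens : List String := ["ten","twenty","thirty","fourty","fifty","sixty","seventy","eighty","ninety"]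

-- num2words; `none` = IndexError.  int(num/10) truncates toward zero = Int.tdiv (exact
-- here: |num| ≤ 2^31 < 2^53 so the float division never crosses an integer boundary).
def num2words (num : Int) : Option String :=
  if num = 0 then some "zero"
  else if num = 100 then some "hundred"
  else if num ≤ 9 then PySem.List.pyGet? pyOnes (num - 1)
  else if 11 ≤ num ∧ num ≤ 19 then PySem.List.pyGet? pyTeens (PySem.Int.mod num 10 - 1)
  else if PySem.Int.mod num 10 = 0 then PySem.List.pyGet? pyTens (Int.tdiv num 10 - 1)
  else
    match PySem.List.pyGet? pyTens (Int.tdiv num 10 - 1), PySem.List.pyGet? pyOnes (PySem.Int.mod num 10 - 1) with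
    | some t, some o => some (t ++ " " ++ o)
    | _, _ => none

-- inner loop of MrString: for i in string: if i in 'aeiou': count += 1
def countVowels (s : String) : Int :=
  s.toList.foldl (fun c i => if i ∈ "aeiou".toList then c + 1 else c) 0

def MrString (num : List Int) : Int :=
  (num.foldl (fun acc n =>
      match acc, num2words n with
      | some s, some str => some (s + countVowels str)
      | _, _ => none) (some 0)).getD 0

-- ===== PORT B =====
def onesV : List Int := [2, 1, 2, 2, 2, 1, 2, 2, 2]
def teensV : List Int := [3, 2, 3, 4, 3, 3, 4, 4, 4]
def tensV : List Int := [1, 1, 1, 2, 1, 1, 2, 2, 2]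

def vowelsAlt (n : Int) : Option Int :=
  if n = 0 ∨ n = 100 then some 2
  else if n ≤ 9 then PySem.List.pyGet? onesV (n - 1)
  else if 11 ≤ n ∧ n ≤ 19 then PySem.List.pyGet? teensV (PySem.Int.mod n 10 - 1)
  else if PySem.Int.mod n 10 = 0 then PySem.List.pyGet? tensV (PySem.Int.floordiv n 10 - 1)
  else
    match PySem.List.pyGet? tensV (PySem.Int.floordiv n 10 - 1), PySem.List.pyGet? onesV (PySem.Int.mod n 10 - 1) with
    | some t, some o => some (t + o)
    | _, _ => none

def MrString_alt (num : List Int) : Int :=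
  (num.map (fun n => (vowelsAlt n).getD 0)).sum

-- ===== PRECONDITION & SPEC =====
-- Pre_ excludes exactly the inputs where A raises IndexError: any element below -8
-- or above 100 hits an out-of-range list index in num2words.
def Pre_MrString (num : List Int) : Prop := ∀ n ∈ num, -8 ≤ n ∧ n ≤ 100
instance (num : List Int) : Decidable (Pre_MrString num) := by unfold Pre_MrString; infer_instance
def pvWitness_MrString : List Int := [0, -8, 7, 15, 45, 100]

def Spec_MrString (num : List Int) (out : Int) : Prop := out = MrString_alt num
instance (num : List Int) (out : Int) : Decidable (Spec_MrString num out) := by unfold Spec_MrString; infer_instance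

-- ===== CLAIM (what is proved, stated in full; the proofs are below) =====
def Claim_equal_MrString : Prop := ∀ (num : List Int), Dom_MrString num → Pre_MrString num → Spec_MrString num (MrString num)

-- ===== LEMMAS AND PROOFS =====
lemma key_count : ∀ n ∈ PySem.List.pyRange (-8) 101 1, (num2words n).map countVowels = vowelsAlt n := by
  decide

lemma key_some : ∀ n ∈ PySem.List.pyRange (-8) 101 1, (vowelsAlt n).isSome = true := by
  decide

lemma fold_eq (num : List Int) (h : Pre_MrString num) : ∀ s : Int,
    num.foldl (fun acc n =>
      match acc, num2words n with
      | some s, some str => some (s + countVowels str)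
      | _, _ => none) (some s)
      = some (s + (num.map (fun n => (vowelsAlt n).getD 0)).sum) := by
  induction num with
  | nil => intro s; simp
  | cons n t ih =>
    intro s
    have hn : n ∈ PySem.List.pyRange (-8) 101 1 := by
      have := h n (List.mem_cons_self ..)
      exact (PySem.List.mem_pyRange_one).mpr ⟨this.1, by omega⟩
    obtain ⟨v, hv⟩ := Option.isSome_iff_exists.mp (key_some n hn)
    have hmap := key_count n hn
    rw [hv] at hmap
    obtain ⟨str, hstr, hcv⟩ := Option.map_eq_some_iff.mp hmap
    have ht : Pre_MrString t := fun m hm => h m (List.mem_cons_of_mem _ hm)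
    simp only [List.foldl_cons, hstr, hcv, List.map_cons, List.sum_cons, hv]
    rw [ih ht (s + v)]
    congr 1
    simp [Option.getD]
    ring

-- ===== VERDICT (by name: the statement is the Claim_ definition above) =====
theorem MrString_spec : Claim_equal_MrString := by
  intro num _ hpre
  unfold Spec_MrString MrString MrString_alt
  rw [fold_eq num hpre 0]
  simp
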